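-- pv_equiv track=rewrite | github.com/NachoTR20/retos_sem_2023_mouredev | reto9.py | isIsograma
-- ===== SOURCE A (Python) =====
-- def isIsograma(text: str) -> bool:
--     result = True
--
--     count = text.count(text[0])
--     for i in range(1, len(text)):
--         aux = text.count(text[i])
--         if aux != count:
--             result = False
--             break
--
--     return result
-- ===== SOURCE B (Python) =====
-- def isIsograma(text: str) -> bool:
--     # sort once, collapse each maximal run of equal characters, then
--     # check that all run lengths coincide
--     chars = sorted(text)
--     runs = []
--     while chars:
--         c = chars[0]
--         k = 0
--         while k < len(chars) and chars[k] == c: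
--             k += 1
--         runs.append(k)
--         chars = chars[k:]
--     return len(set(runs)) == 1
-- ===== Notes on version B (the rewrite author's own statement) =====
-- stated objective: faster
-- what changed: Replaces A's per-character text.count scan (quadratic) with one sort followed by a single run-collapsing pass whose run lengths are compared for equality.
-- outside the precondition, e.g. on isIsograma(''): A raises IndexError, B returns False
import Mathlib
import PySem

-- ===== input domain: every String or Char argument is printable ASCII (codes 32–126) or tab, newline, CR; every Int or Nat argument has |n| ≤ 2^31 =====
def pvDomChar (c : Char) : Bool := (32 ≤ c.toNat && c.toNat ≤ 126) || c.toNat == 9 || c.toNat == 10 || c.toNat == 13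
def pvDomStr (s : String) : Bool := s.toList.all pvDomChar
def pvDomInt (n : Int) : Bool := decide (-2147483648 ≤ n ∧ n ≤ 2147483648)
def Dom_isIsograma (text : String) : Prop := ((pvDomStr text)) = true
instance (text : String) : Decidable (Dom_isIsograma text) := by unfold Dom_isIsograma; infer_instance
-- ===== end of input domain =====

-- B replaces A's per-character count scans with one sort plus a single run-collapsing pass (asymptotically faster).

-- ===== PORT A =====
-- the for-loop with break: walks the index list, stops with False at the first mismatching count
def isoLoopA (cs : List Char) (count : Nat) : List Int → Bool
  | [] => true
  | i :: rest =>
    match PySem.List.pyGet? cs i with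
    | none => true  -- IndexError in Python; unreachable, loop indices are in range
    | some c =>
      let aux := cs.count c  -- text.count(text[i]): a 1-char needle, = character count
      if aux ≠ count then false else isoLoopA cs count rest

def isIsograma (text : String) : Bool :=
  let cs := text.toList
  match PySem.Str.pyGet? text 0 with
  | none => true  -- Python raises IndexError on empty text; excluded by Pre_
  | some c0 =>
    let count := cs.count c0  -- text.count(text[0]): a 1-char needle, = character count
    isoLoopA cs count (PySem.List.pyRange 1 (cs.length : Int) 1)

-- ===== PORT B =====
-- inner while loop: length of the leading run of c
def bRun (c : Char) : List Char → Nat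
  | [] => 0
  | x :: xs => if x = c then bRun c xs + 1 else 0

-- outer while loop: collapse maximal runs, recording their lengths, on the shrinking list
def bRuns : List Char → List Nat
  | [] => []
  | c :: rest =>
    let k := bRun c (c :: rest)
    k :: bRuns ((c :: rest).drop k)
termination_by l => l.length
decreasing_by simp [bRun]

def isIsograma_alt (text : String) : Bool :=
  let chars := PySem.List.sorted text.toList (fun c => c) false
  let runs := bRuns chars
  PySem.Set.len (PySem.Set.ofList runs) == 1

-- ===== PRECONDITION & SPEC =====
-- Pre_ excludes only the empty string, on which Python A raises IndexError (text[0]).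
def Pre_isIsograma (text : String) : Prop := text ≠ ""
instance (text : String) : Decidable (Pre_isIsograma text) := by unfold Pre_isIsograma; infer_instance
def pvWitness_isIsograma : String := "abc"

def Spec_isIsograma (text : String) (out : Bool) : Prop := out = isIsograma_alt text
instance (text : String) (out : Bool) : Decidable (Spec_isIsograma text out) := by unfold Spec_isIsograma; infer_instance

-- ===== CLAIM (what is proved, stated in full; the proofs are below) =====
def Claim_equal_isIsograma : Prop := ∀ (text : String), Dom_isIsograma text → Pre_isIsograma text → Spec_isIsograma text (isIsograma text)

-- ===== LEMMAS AND PROOFS =====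

-- A-side: the loop returns true iff every visited (in-range) character has the reference count
theorem loopA_iff (cs : List Char) (count : Nat) (idxs : List Int)
    (hr : ∀ i ∈ idxs, ∃ c, PySem.List.pyGet? cs i = some c) :
    isoLoopA cs count idxs = true ↔
      ∀ i ∈ idxs, ∀ c, PySem.List.pyGet? cs i = some c → cs.count c = count := by
  induction idxs with
  | nil => simp [isoLoopA]
  | cons i rest ih =>
    obtain ⟨c, hc⟩ := hr i (List.mem_cons_self)
    have ih' := ih (fun j hj => hr j (List.mem_cons_of_mem _ hj))
    simp only [isoLoopA, hc]
    by_cases hcount : cs.count c = count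
    · simp only [hcount, ne_eq, not_true_eq_false, if_false]
      rw [ih']
      constructor
      · intro hall j hj d hd
        rcases List.mem_cons.mp hj with rfl | hj
        · rw [hc] at hd; cases hd; exact hcount
        · exact hall j hj d hd
      · intro hall j hj d hd
        exact hall j (List.mem_cons_of_mem _ hj) d hd
    · simp only [ne_eq, hcount, not_false_eq_true, if_true]
      constructor
      · intro hfalse; cases hfalse
      · intro hall
        exact absurd (hall i List.mem_cons_self c hc) hcount

theorem A_iff (c0 : Char) (rest : List Char) :
    (isoLoopA (c0 :: rest) ((c0 :: rest).count c0) (PySem.List.pyRange 1 ((c0 :: rest).length : Int) 1) = true) ↔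
      ∀ c ∈ c0 :: rest, (c0 :: rest).count c = (c0 :: rest).count c0 := by
  set cs := c0 :: rest with hcs
  have hr : ∀ i ∈ PySem.List.pyRange 1 (cs.length : Int) 1, ∃ c, PySem.List.pyGet? cs i = some c := by
    intro i hi
    have h12 := (PySem.List.mem_pyRange_one).mp hi
    exact ⟨_, PySem.List.pyGet?_eq_some_getElem cs (by omega) (by omega)⟩
  rw [loopA_iff _ _ _ hr]
  constructor
  · intro hall c hcmem
    obtain ⟨j, hj, hget⟩ := List.mem_iff_getElem.mp hcmem
    rcases Nat.eq_zero_or_pos j with rfl | hj1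
    · have : c = c0 := by simpa [hcs] using hget.symm
      rw [this]
    · have hmem : (j : Int) ∈ PySem.List.pyRange 1 (cs.length : Int) 1 :=
        (PySem.List.mem_pyRange_one).mpr ⟨by exact_mod_cast hj1, by exact_mod_cast hj⟩
      have hg : PySem.List.pyGet? cs (j : Int) = some c := by
        rw [PySem.List.pyGet?_natCast, List.getElem?_eq_getElem hj, hget]
      exact hall (j : Int) hmem c hg
  · intro hall i _ c hget
    exact hall c (PySem.List.mem_of_pyGet?_eq_some cs hget)

-- B-side invariants
theorem bRun_take (c : Char) (l : List Char) : ∀ a ∈ l.take (bRun c l), a = c := by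
  induction l with
  | nil => simp
  | cons x xs ih =>
    by_cases hx : x = c
    · subst hx; simpa [bRun] using ih
    · simp [bRun, hx]

theorem bRun_prop (l : List Char) (c : Char) (hp : l.Pairwise (· ≤ ·)) (hc : ∀ a ∈ l, c ≤ a) :
    bRun c l = l.count c ∧ c ∉ l.drop (bRun c l) := by
  induction l with
  | nil => simp [bRun]
  | cons x xs ih =>
    have hx : ∀ b ∈ xs, x ≤ b := (List.pairwise_cons.mp hp).1
    have hxs : xs.Pairwise (· ≤ ·) := (List.pairwise_cons.mp hp).2
    by_cases hxc : x = c
    · subst hxc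
      have ⟨h1, h2⟩ := ih hxs (fun a ha => hx a ha)
      constructor
      · simp [bRun, h1]
      · simpa [bRun, h1] using h2
    · have hcx : c < x := lt_of_le_of_ne (hc x (.head _)) (fun h => hxc h.symm)
      constructor
      · simp only [bRun, if_neg hxc]
        symm
        rw [List.count_eq_zero]
        intro hmem
        rcases List.mem_cons.mp hmem with h | h
        · exact hxc h.symm
        · exact absurd (hx c h) (not_le_of_gt hcx)
      · simp only [bRun, if_neg hxc, List.drop_zero]
        intro hmem
        rcases List.mem_cons.mp hmem with h | h
        · exact hxc h.symm
        · exact absurd (hx c h) (not_le_of_gt hcx)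

theorem bRuns_mem : ∀ (l : List Char), l.Pairwise (· ≤ ·) →
    ∀ k, (k ∈ bRuns l ↔ ∃ c ∈ l, k = l.count c)
  | [], _, k => by simp [bRuns]
  | c :: rest, hp, k => by
    set l := c :: rest with hl
    have hc : ∀ a ∈ l, c ≤ a := by
      intro a ha
      rcases List.mem_cons.mp ha with rfl | ha
      · exact le_refl a
      · exact (List.pairwise_cons.mp hp).1 a ha
    obtain ⟨hk, hnot⟩ := bRun_prop l c hp hc
    have hk1 : 1 ≤ bRun c l := by simp [hl, bRun]
    have htake : ∀ a ∈ l.take (bRun c l), a = c := bRun_take c l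
    have hcnt : ∀ a, a ≠ c → (l.drop (bRun c l)).count a = l.count a := by
      intro a hac
      conv_rhs => rw [← List.take_append_drop (bRun c l) l]
      rw [List.count_append]
      have : (l.take (bRun c l)).count a = 0 := by
        rw [List.count_eq_zero]
        intro hmem
        exact hac (htake a hmem)
      omega
    have hmemd : ∀ a, a ∈ l → a ≠ c → a ∈ l.drop (bRun c l) := by
      intro a ha hac
      rw [← List.take_append_drop (bRun c l) l] at ha
      rcases List.mem_append.mp ha with h | h
      · exact absurd (htake a h) hac
      · exact h
    have hpd : (l.drop (bRun c l)).Pairwise (· ≤ ·) := hp.sublist (List.drop_sublist _ _)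
    have hlen : (l.drop (bRun c l)).length < l.length := by
      have h0 : l.length = rest.length + 1 := by simp [hl]
      rw [List.length_drop]; omega
    have ih := bRuns_mem (l.drop (bRun c l)) hpd k
    rw [show bRuns l = bRun c l :: bRuns (l.drop (bRun c l)) from by rw [hl, bRuns]]
    simp only [List.mem_cons, ih]
    constructor
    · rintro (rfl | ⟨a, ha, rfl⟩)
      · exact ⟨c, List.mem_cons_self, hk.symm ▸ rfl⟩
      · have hac : a ≠ c := fun h => hnot (h ▸ ha)
        exact ⟨a, List.mem_of_mem_drop ha, (hcnt a hac)⟩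
    · rintro ⟨a, ha, rfl⟩
      by_cases hac : a = c
      · subst hac; exact Or.inl hk.symm
      · exact Or.inr ⟨a, hmemd a ha hac, (hcnt a hac).symm⟩
termination_by l => l.length

theorem bRuns_cons (c : Char) (rest : List Char) :
    bRuns (c :: rest) = bRun c (c :: rest) :: bRuns ((c :: rest).drop (bRun c (c :: rest))) := by
  rw [bRuns]

theorem bRuns_ne_nil (l : List Char) (h : l ≠ []) : bRuns l ≠ [] := by
  cases l with
  | nil => exact absurd rfl h
  | cons c rest => rw [bRuns_cons]; simp

-- set-size-one characterisation
theorem setlen_one_iff (runs : List Nat) :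
    (PySem.Set.len (PySem.Set.ofList runs) == 1) = true ↔
      runs ≠ [] ∧ ∀ x ∈ runs, ∀ y ∈ runs, x = y := by
  rw [beq_iff_eq, PySem.Set.len]
  have : ((PySem.Set.ofList runs).length : Int) = 1 ↔ (PySem.Set.ofList runs).length = 1 := by
    omega
  rw [this, List.length_eq_one_iff]
  constructor
  · rintro ⟨a, ha⟩
    constructor
    · rintro rfl
      rw [show PySem.Set.ofList ([] : List Nat) = [] from rfl] at ha
      cases ha
    · intro x hx y hy
      have hx' : x ∈ PySem.Set.ofList runs := (PySem.Set.mem_ofList _ _).mpr hx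
      have hy' : y ∈ PySem.Set.ofList runs := (PySem.Set.mem_ofList _ _).mpr hy
      rw [ha] at hx' hy'
      simp at hx' hy'
      rw [hx', hy']
  · rintro ⟨hne, hall⟩
    obtain ⟨r, rs, rfl⟩ := List.exists_cons_of_ne_nil hne
    have hr : r ∈ PySem.Set.ofList (r :: rs) := (PySem.Set.mem_ofList _ _).mpr List.mem_cons_self
    have hmem : ∀ x ∈ PySem.Set.ofList (r :: rs), x = r := by
      intro x hx
      exact hall x ((PySem.Set.mem_ofList _ _).mp hx) r List.mem_cons_self
    have hnd : (PySem.Set.ofList (r :: rs)).Nodup := PySem.Set.nodup_ofList _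
    cases hs : PySem.Set.ofList (r :: rs) with
    | nil => rw [hs] at hr; cases hr
    | cons a t =>
      refine ⟨a, ?_⟩
      have ha : a = r := hmem a (hs ▸ List.mem_cons_self)
      have ht : t = [] := by
        cases t with
        | nil => rfl
        | cons b t' =>
          have hb : b = r := hmem b (hs ▸ List.mem_cons_of_mem _ List.mem_cons_self)
          rw [hs] at hnd
          have := (List.nodup_cons.mp hnd).1
          exact (this (by rw [ha, ← hb]; exact List.mem_cons_self)).elim
      rw [ht]

-- B returns true iff, on the sorted copy, all character counts agree pairwise
theorem B_iff (text : String) :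
    (isIsograma_alt text = true) ↔
      ((PySem.List.sorted text.toList (fun c => c) false) ≠ [] ∧
       ∀ a ∈ PySem.List.sorted text.toList (fun c => c) false,
        ∀ b ∈ PySem.List.sorted text.toList (fun c => c) false,
        (PySem.List.sorted text.toList (fun c => c) false).count a =
          (PySem.List.sorted text.toList (fun c => c) false).count b) := by
  set s := PySem.List.sorted text.toList (fun c => c) false with hs
  have hp : s.Pairwise (· ≤ ·) := by
    simpa using PySem.List.sorted_pairwise text.toList (fun c => c)
  rw [show isIsograma_alt text = (PySem.Set.len (PySem.Set.ofList (bRuns s)) == 1) from rfl]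
  rw [setlen_one_iff]
  constructor
  · rintro ⟨hne, hall⟩
    have hsne : s ≠ [] := by
      intro h; rw [h] at hne; exact hne (by simp [bRuns])
    refine ⟨hsne, ?_⟩
    intro a ha b hb
    exact hall (s.count a) ((bRuns_mem s hp _).mpr ⟨a, ha, rfl⟩)
      (s.count b) ((bRuns_mem s hp _).mpr ⟨b, hb, rfl⟩)
  · rintro ⟨hsne, hall⟩
    refine ⟨bRuns_ne_nil s hsne, ?_⟩
    intro x hx y hy
    obtain ⟨a, ha, rfl⟩ := (bRuns_mem s hp x).mp hx
    obtain ⟨b, hb, rfl⟩ := (bRuns_mem s hp y).mp hy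
    exact hall a ha b hb

theorem isIsograma_spec' (text : String) (h : text ≠ "") :
    isIsograma text = isIsograma_alt text := by
  obtain ⟨c0, rest, hcs⟩ := List.exists_cons_of_ne_nil (fun hn => h (String.toList_eq_nil_iff.mp hn))
  rw [Bool.eq_iff_iff]
  -- reduce the A side
  have hget : PySem.Str.pyGet? text 0 = some c0 := by
    rw [PySem.Str.pyGet?]
    rw [show PySem.Chars.pyGet? text.toList 0 = PySem.List.pyGet? text.toList 0 from rfl]
    rw [hcs, PySem.List.pyGet?_zero_cons]
  have hA : isIsograma text =
      isoLoopA (c0 :: rest) ((c0 :: rest).count c0)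
        (PySem.List.pyRange 1 ((c0 :: rest).length : Int) 1) := by
    rw [isIsograma]
    simp only [hget, hcs]
  rw [hA, A_iff, B_iff]
  set s := PySem.List.sorted text.toList (fun c => c) false with hs
  have hperm : s.Perm text.toList := PySem.List.sorted_perm text.toList (fun c => c) false
  have hperm' : s.Perm (c0 :: rest) := hcs ▸ hperm
  constructor
  · intro hall
    refine ⟨fun hn => by have := hperm'.length_eq; rw [hn] at this; simp at this, ?_⟩
    intro a ha b hb
    rw [hperm'.count_eq a, hperm'.count_eq b,
      hall a (hperm'.mem_iff.mp ha), hall b (hperm'.mem_iff.mp hb)]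
  · rintro ⟨_, hall⟩
    intro c hc
    have hc' : c ∈ s := hperm'.mem_iff.mpr hc
    have hc0' : c0 ∈ s := hperm'.mem_iff.mpr List.mem_cons_self
    have := hall c hc' c0 hc0'
    rwa [hperm'.count_eq c, hperm'.count_eq c0] at this

-- ===== VERDICT (by name: the statement is the Claim_ definition above) =====
theorem isIsograma_spec : Claim_equal_isIsograma := by
  intro text _ hpre
  unfold Spec_isIsograma
  exact isIsograma_spec' text hpre
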